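-- pv_equiv track=rewrite | github.com/HPC-21020/tetris | tetris2.py | calculate_ghost_position
-- ===== SOURCE A (Python) =====
-- def calculate_ghost_position(cells, settled_cells):
--     """
--     Calculate where the current piece would land if dropped straight down.
--     Returns the ghost cells showing the landing position.
--     """
--     # If no cells, return empty list to avoid infinite loop
--     if not cells:
--         return []
--
--     ghost_cells = list(cells)  # Convert to list and copy
--
--     # Keep moving down until we can't move anymore
--     while True:
--         next_ghost = [(x, y + 1) for x, y in ghost_cells]
--         if can_move(next_ghost, 0, 0, settled_cells):
--             ghost_cells = next_ghost
--         else: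
--             break
--
--     return ghost_cells
--
-- def can_move(cells, dx, dy, settled_cells):
--     """Check if a piece can move in a given direction without colliding."""
--     new_cells = [(x + dx, y + dy) for x, y in cells]
--     return all(0 <= x < WIDTH and y < HEIGHT and (x, y) not in settled_cells for x, y in new_cells)
--
-- HEIGHT = 20
--
-- WIDTH = 10
-- ===== SOURCE B (Python) =====
-- HEIGHT = 20
-- WIDTH = 10
--
-- def _max_drop(x, y, settled_cells):
--     """Largest downward shift for one cell: closed-form, no simulation."""
--     if not (0 <= x < WIDTH):
--         return 0
--     floor = HEIGHT - 1 - y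
--     for sx, sy in settled_cells:
--         if sx == x and sy > y:
--             floor = min(floor, sy - y - 1)
--     return max(floor, 0)
--
-- def calculate_ghost_position(cells, settled_cells):
--     if not cells:
--         return []
--     drop = min(_max_drop(x, y, settled_cells) for x, y in cells)
--     return [(x, y + drop) for x, y in cells]
-- ===== Notes on version B (the rewrite author's own statement) =====
-- stated objective: alternative
-- what changed: A simulates the drop step by step (re-checking every cell against every settled cell once per row of fall); B computes each cell's maximal drop in closed form (nearest settled cell strictly below in its column, floored by HEIGHT-1-y, clamped at 0), takes the minimum over the piece, and shifts all cells once.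
import Mathlib
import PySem

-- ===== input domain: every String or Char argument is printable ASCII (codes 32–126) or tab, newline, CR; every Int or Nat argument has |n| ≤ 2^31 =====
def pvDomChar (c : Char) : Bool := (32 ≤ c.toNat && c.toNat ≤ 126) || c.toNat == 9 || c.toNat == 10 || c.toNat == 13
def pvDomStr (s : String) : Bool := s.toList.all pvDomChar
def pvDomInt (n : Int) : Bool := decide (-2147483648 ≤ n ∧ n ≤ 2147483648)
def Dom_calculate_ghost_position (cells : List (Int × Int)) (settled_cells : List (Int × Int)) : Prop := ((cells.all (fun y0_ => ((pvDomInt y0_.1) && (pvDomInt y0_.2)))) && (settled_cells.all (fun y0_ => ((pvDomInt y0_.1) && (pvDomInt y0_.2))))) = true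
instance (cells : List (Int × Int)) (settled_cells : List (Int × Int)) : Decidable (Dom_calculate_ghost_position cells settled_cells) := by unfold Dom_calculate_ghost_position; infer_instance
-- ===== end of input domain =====

-- B replaces A's step-by-step drop simulation by a closed-form maximal drop per cell
-- (minimised over the piece); objective: alternative algorithm (one scan, no simulation).

-- ===== PORT A =====
-- can_move(cells, dx, dy, settled_cells)
def canMove (cells : List (Int × Int)) (dx dy : Int) (settled_cells : List (Int × Int)) : Bool :=
  cells.all (fun p =>
    decide (0 ≤ p.1 + dx ∧ p.1 + dx < 10 ∧ p.2 + dy < 20 ∧ (p.1 + dx, p.2 + dy) ∉ settled_cells))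

-- the 'while True' loop of A; Python enters it only with nonempty ghost_cells
def dropLoop : List (Int × Int) → List (Int × Int) → List (Int × Int)
  | [], _ => []   -- unreachable: A's loop is only entered with nonempty cells
  | c :: rest, settled =>
    if h : canMove ((c :: rest).map (fun p => (p.1, p.2 + 1))) 0 0 settled
    then dropLoop ((c :: rest).map (fun p => (p.1, p.2 + 1))) settled
    else c :: rest
  termination_by ghost _ => (20 - (ghost.headD (0, 0)).2).toNat
  decreasing_by
    simp only [canMove, List.map_cons, List.all_cons, Bool.and_eq_true, decide_eq_true_eq,
      List.headD_cons] at h ⊢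
    omega

def calculate_ghost_position (cells : List (Int × Int)) (settled_cells : List (Int × Int)) : List (Int × Int) :=
  if cells = [] then [] else dropLoop cells settled_cells

-- ===== PORT B =====
-- _max_drop(x, y, settled_cells)
def maxDrop (x y : Int) (settled_cells : List (Int × Int)) : Int :=
  if 0 ≤ x ∧ x < 10 then
    max (settled_cells.foldl
          (fun floor p => if p.1 = x ∧ p.2 > y then min floor (p.2 - y - 1) else floor)
          (20 - 1 - y)) 0
  else 0

def calculate_ghost_position_alt (cells : List (Int × Int)) (settled_cells : List (Int × Int)) : List (Int × Int) :=
  match cells with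
  | [] => []
  | c :: rest =>
    -- min(...) over the nonempty generator, as a fold from its first element
    let drop := (rest.map (fun p => maxDrop p.1 p.2 settled_cells)).foldl min
                  (maxDrop c.1 c.2 settled_cells)
    (c :: rest).map (fun p => (p.1, p.2 + drop))

-- ===== PRECONDITION & SPEC =====
def Spec_calculate_ghost_position (cells : List (Int × Int)) (settled_cells : List (Int × Int)) (out : List (Int × Int)) : Prop := out = calculate_ghost_position_alt cells settled_cells
instance (cells : List (Int × Int)) (settled_cells : List (Int × Int)) (out : List (Int × Int)) : Decidable (Spec_calculate_ghost_position cells settled_cells out) := by unfold Spec_calculate_ghost_position; infer_instance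

-- ===== CLAIM (what is proved, stated in full; the proofs are below) =====
def Claim_equal_calculate_ghost_position : Prop := ∀ (cells : List (Int × Int)) (settled_cells : List (Int × Int)), Dom_calculate_ghost_position cells settled_cells → Spec_calculate_ghost_position cells settled_cells (calculate_ghost_position cells settled_cells)

-- ===== LEMMAS AND PROOFS =====

-- one cell can move one step down
def stepOK (p : Int × Int) (settled : List (Int × Int)) : Prop :=
  0 ≤ p.1 ∧ p.1 < 10 ∧ p.2 + 1 < 20 ∧ (p.1, p.2 + 1) ∉ settled

-- the minimal drop over a nonempty piece, as computed by the alt port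
def dMin (c : Int × Int) (rest settled : List (Int × Int)) : Int :=
  (rest.map (fun p => maxDrop p.1 p.2 settled)).foldl min (maxDrop c.1 c.2 settled)

lemma foldl_min_ge (ds : List Int) (a c : Int) :
    c ≤ ds.foldl min a ↔ c ≤ a ∧ ∀ d ∈ ds, c ≤ d := by
  induction ds generalizing a with
  | nil => simp
  | cons d ds ih =>
    simp only [List.foldl_cons, List.mem_cons, ih, le_min_iff]
    constructor
    · rintro ⟨⟨h1, h2⟩, h3⟩
      exact ⟨h1, fun d' hd' => hd'.elim (fun e => e ▸ h2) (h3 d')⟩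
    · rintro ⟨h1, h2⟩
      exact ⟨⟨h1, h2 _ (Or.inl rfl)⟩, fun d' hd' => h2 d' (Or.inr hd')⟩

lemma maxDrop_nonneg (x y : Int) (s : List (Int × Int)) : 0 ≤ maxDrop x y s := by
  unfold maxDrop; split <;> simp

lemma fold_cond_ge (s : List (Int × Int)) (x y a c : Int) :
    c ≤ s.foldl (fun floor p => if p.1 = x ∧ p.2 > y then min floor (p.2 - y - 1) else floor) a ↔
      c ≤ a ∧ ∀ p ∈ s, p.1 = x → p.2 > y → c ≤ p.2 - y - 1 := by
  induction s generalizing a with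
  | nil => simp
  | cons p s ih =>
    simp only [List.foldl_cons, ih, List.mem_cons]
    constructor
    · rintro ⟨h1, h2⟩
      refine ⟨?_, ?_⟩
      · split at h1 <;> omega
      · rintro q (rfl | hq) h3 h4
        · split at h1 <;> omega
        · exact h2 q hq h3 h4
    · rintro ⟨h1, h2⟩
      constructor
      · split
        · next hc => exact le_min h1 (h2 p (Or.inl rfl) hc.1 hc.2)
        · exact h1
      · exact fun q hq => h2 q (Or.inr hq)

lemma maxDrop_ge_one_iff (p : Int × Int) (settled : List (Int × Int)) :
    1 ≤ maxDrop p.1 p.2 settled ↔ stepOK p settled := by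
  unfold maxDrop stepOK
  by_cases hx : 0 ≤ p.1 ∧ p.1 < 10
  · rw [if_pos hx, le_max_iff]
    simp only [show ¬ (1:Int) ≤ 0 by omega, or_false]
    rw [fold_cond_ge]
    constructor
    · rintro ⟨h1, h2⟩
      refine ⟨hx.1, hx.2, by omega, fun hm => ?_⟩
      have := h2 _ hm rfl (by omega); omega
    · rintro ⟨_, _, h3, h4⟩
      refine ⟨by omega, fun q hq hx' hy' => ?_⟩
      by_contra hlt
      have hq2 : q = (p.1, p.2 + 1) := by
        obtain ⟨qa, qb⟩ := q
        simp only [Prod.mk.injEq]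
        simp only [] at hx' hy' hlt
        exact ⟨hx', by omega⟩
      exact h4 (hq2 ▸ hq)
  · rw [if_neg hx]
    constructor
    · intro h; omega
    · rintro ⟨h1, h2, _⟩; exact absurd ⟨h1, h2⟩ hx

-- shifting a cell down one step decreases its maximal drop by one (when it can step)
lemma fold_cond_shift (s : List (Int × Int)) (x y a : Int) (hs : (x, y + 1) ∉ s) :
    s.foldl (fun floor p => if p.1 = x ∧ p.2 > y + 1 then min floor (p.2 - (y+1) - 1) else floor) (a - 1) =
      s.foldl (fun floor p => if p.1 = x ∧ p.2 > y then min floor (p.2 - y - 1) else floor) a - 1 := by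
  induction s generalizing a with
  | nil => simp
  | cons p s ih =>
    simp only [List.mem_cons, not_or] at hs
    simp only [List.foldl_cons]
    rw [show (if p.1 = x ∧ p.2 > y + 1 then min (a-1) (p.2 - (y+1) - 1) else a - 1)
          = (if p.1 = x ∧ p.2 > y then min a (p.2 - y - 1) else a) - 1 by
        have hne : p ≠ (x, y + 1) := fun h => hs.1 h.symm
        obtain ⟨pa, pb⟩ := p
        by_cases h1 : pa = x
        · subst h1
          have : pb ≠ y + 1 := by intro h; exact hne (by rw [h])
          split <;> split <;> simp_all <;> omega
        · simp [h1]]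
    exact ih _ hs.2

lemma maxDrop_shift (p : Int × Int) (settled : List (Int × Int)) (h : stepOK p settled) :
    maxDrop p.1 (p.2 + 1) settled = maxDrop p.1 p.2 settled - 1 := by
  have h1 := (maxDrop_ge_one_iff p settled).mpr h
  unfold maxDrop at *
  obtain ⟨hx1, hx2, hy, hmem⟩ := h
  rw [if_pos ⟨hx1, hx2⟩] at h1 ⊢
  rw [if_pos ⟨hx1, hx2⟩]
  rw [show (20 - 1 - (p.2 + 1) : Int) = (20 - 1 - p.2) - 1 by ring, fold_cond_shift _ _ _ _ hmem]
  omega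

lemma foldl_min_sub_one (ds : List Int) (a : Int) :
    (ds.map (fun d => d - 1)).foldl min (a - 1) = ds.foldl min a - 1 := by
  induction ds generalizing a with
  | nil => simp
  | cons d ds ih =>
    simp only [List.map_cons, List.foldl_cons]
    rw [show min (a - 1) (d - 1) = min a d - 1 by omega]
    exact ih _

lemma dMin_nonneg (c : Int × Int) (rest settled : List (Int × Int)) : 0 ≤ dMin c rest settled := by
  unfold dMin
  rw [foldl_min_ge]
  refine ⟨maxDrop_nonneg _ _ _, ?_⟩
  simp only [List.mem_map]
  rintro d ⟨p, _, rfl⟩; exact maxDrop_nonneg _ _ _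

lemma dMin_ge_one_iff (c : Int × Int) (rest settled : List (Int × Int)) :
    1 ≤ dMin c rest settled ↔ ∀ p ∈ c :: rest, stepOK p settled := by
  unfold dMin
  rw [foldl_min_ge]
  simp only [List.mem_map, List.mem_cons]
  constructor
  · rintro ⟨h1, h2⟩ p (rfl | hp)
    · exact (maxDrop_ge_one_iff _ _).mp h1
    · exact (maxDrop_ge_one_iff _ _).mp (h2 _ ⟨p, hp, rfl⟩)
  · intro h
    refine ⟨(maxDrop_ge_one_iff _ _).mpr (h c (by simp)), ?_⟩
    rintro d ⟨p, hp, rfl⟩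
    exact (maxDrop_ge_one_iff _ _).mpr (h p (by simp [hp]))

lemma dMin_shift (c : Int × Int) (rest settled : List (Int × Int))
    (h : ∀ p ∈ c :: rest, stepOK p settled) :
    dMin (c.1, c.2 + 1) (rest.map (fun p => (p.1, p.2 + 1))) settled = dMin c rest settled - 1 := by
  unfold dMin
  have hmap : (rest.map (fun p => (p.1, p.2 + 1))).map (fun p => maxDrop p.1 p.2 settled)
      = (rest.map (fun p => maxDrop p.1 p.2 settled)).map (fun d => d - 1) := by
    simp only [List.map_map]
    apply List.map_congr_left
    intro p hp
    exact maxDrop_shift p settled (h p (by simp [hp]))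
  rw [hmap, show maxDrop (c.1, c.2 + 1).1 (c.1, c.2 + 1).2 settled = maxDrop c.1 c.2 settled - 1 from
      maxDrop_shift c settled (h c (by simp)), foldl_min_sub_one]

lemma canMove_shift_iff (c : Int × Int) (rest settled : List (Int × Int)) :
    canMove ((c :: rest).map (fun p => (p.1, p.2 + 1))) 0 0 settled = true ↔
      ∀ p ∈ c :: rest, stepOK p settled := by
  unfold canMove stepOK
  simp only [List.all_map, List.all_eq_true, Function.comp, decide_eq_true_eq,
    add_zero]

lemma dropLoop_eq (c : Int × Int) (rest settled : List (Int × Int)) :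
    dropLoop (c :: rest) settled
      = (c :: rest).map (fun p => (p.1, p.2 + dMin c rest settled)) := by
  generalize hn : (20 - c.2).toNat = n
  induction n using Nat.strong_induction_on generalizing c rest with
  | _ n ih =>
    rw [dropLoop]
    split
    · next hcm =>
      have hall := (canMove_shift_iff c rest settled).mp hcm
      have h1 : 1 ≤ dMin c rest settled := (dMin_ge_one_iff c rest settled).mpr hall
      have hy : c.2 + 1 < 20 := (hall c (by simp)).2.2.1
      simp only [List.map_cons]
      rw [ih (20 - (c.2 + 1)).toNat (by omega) (c.1, c.2 + 1) (rest.map (fun p => (p.1, p.2 + 1))) rfl]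
      rw [show dMin (c.1, c.2 + 1) (rest.map (fun p => (p.1, p.2 + 1))) settled
            = dMin c rest settled - 1 from dMin_shift c rest settled hall]
      simp only [List.map_cons, List.map_map, List.cons.injEq]
      constructor
      · simp only [Prod.mk.injEq]
        exact ⟨trivial, by ring⟩
      · apply List.map_congr_left
        intro p _
        simp only [Function.comp, Prod.mk.injEq]
        exact ⟨trivial, by ring⟩
    · next hcm =>
      have hnot : ¬ ∀ p ∈ c :: rest, stepOK p settled := by
        intro h; exact hcm ((canMove_shift_iff c rest settled).mpr h)
      -- some cell has maxDrop 0, hence dMin = 0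
      have h0 : ¬ 1 ≤ dMin c rest settled := fun h => hnot ((dMin_ge_one_iff c rest settled).mp h)
      have hge := dMin_nonneg c rest settled
      have : dMin c rest settled = 0 := by omega
      rw [this]
      simp

-- ===== VERDICT (by name: the statement is the Claim_ definition above) =====
theorem calculate_ghost_position_spec : Claim_equal_calculate_ghost_position := by
  intro cells settled _
  unfold Spec_calculate_ghost_position calculate_ghost_position calculate_ghost_position_alt
  match cells with
  | [] => simp
  | c :: rest =>
    simp only [reduceCtorEq, if_false]
    exact dropLoop_eq c rest settled
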